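-- pv_equiv track=rewrite | github.com/chaitenya-guvi/python_selenium_oct23 | Generators/generators_4_list.py | gen_first_abundants
-- ===== SOURCE A (Python) =====
-- def is_abundant(n):
--     total = 0
--     for d in range(1,n):
--         if n % d == 0:
--             total += d
--     return total > n
--
-- def gen_first_abundants(n):
--     count = 0
--     num = 1
--     while count < n:
--         if is_abundant(num):
--             yield num
--             count += 1
--         num +=1
-- ===== SOURCE B (Python) =====
-- def _proper_divisor_sum(num):
--     # sum of proper divisors via pairing d with num//d, d up to sqrt(num)
--     if num <= 1:
--         return 0
--     total = 1
--     d = 2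
--     while d * d <= num:
--         if num % d == 0:
--             total += d
--             q = num // d
--             if q != d:
--                 total += q
--         d += 1
--     return total
--
-- def gen_first_abundants(n):
--     count = 0
--     num = 1
--     while count < n:
--         if _proper_divisor_sum(num) > num:
--             yield num
--             count += 1
--         num += 1
-- ===== Notes on version B (the rewrite author's own statement) =====
-- stated objective: faster
-- what changed: The abundance test now sums proper divisors by pairing each divisor d <= sqrt(num) with its cofactor num//d, instead of trial-dividing by every d in range(1, num).
import Mathlib
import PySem

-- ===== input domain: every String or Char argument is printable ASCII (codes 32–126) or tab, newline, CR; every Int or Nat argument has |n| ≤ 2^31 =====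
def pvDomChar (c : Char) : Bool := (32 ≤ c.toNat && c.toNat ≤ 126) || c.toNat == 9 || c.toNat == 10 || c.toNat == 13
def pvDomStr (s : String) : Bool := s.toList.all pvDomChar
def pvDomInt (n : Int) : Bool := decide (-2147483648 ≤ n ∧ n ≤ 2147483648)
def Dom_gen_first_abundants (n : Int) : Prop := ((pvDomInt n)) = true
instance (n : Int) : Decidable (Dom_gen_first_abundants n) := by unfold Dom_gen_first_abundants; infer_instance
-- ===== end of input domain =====

-- B replaces A's O(num) trial-division divisor sum by an O(sqrt(num)) paired-divisor sum; return value proved equal.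
-- Both whiles are ported with fuel 6*n+12, sufficient because every multiple of 6 from 12 on is abundant.

-- ===== PORT A =====
def is_abundant (n : Int) : Bool :=
  decide ((PySem.List.pyRange 1 n 1).foldl
    (fun total d => if PySem.Int.mod n d = 0 then total + d else total) 0 > n)

def genLoopA : Nat → Int → Int → Int → List Int → List Int
  | 0, _, _, _, acc => acc
  | fuel+1, n, count, num, acc =>
    if count < n then
      if is_abundant num then genLoopA fuel n (count+1) (num+1) (acc ++ [num])
      else genLoopA fuel n count (num+1) acc
    else acc

def gen_first_abundants (n : Int) : List Int := genLoopA (6 * n.toNat + 12) n 0 1 []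

-- ===== PORT B =====
def sigmaLoop : Nat → Int → Int → Int → Int
  | 0, _, _, total => total
  | fuel+1, num, d, total =>
    if d * d ≤ num then
      if PySem.Int.mod num d = 0 then
        sigmaLoop fuel num (d+1)
          (if PySem.Int.floordiv num d ≠ d then (total + d) + PySem.Int.floordiv num d
           else total + d)
      else sigmaLoop fuel num (d+1) total
    else total

def proper_divisor_sum (num : Int) : Int :=
  if num ≤ 1 then 0 else sigmaLoop (num.toNat + 2) num 2 1

def genLoopB : Nat → Int → Int → Int → List Int → List Int
  | 0, _, _, _, acc => acc
  | fuel+1, n, count, num, acc =>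
    if count < n then
      if proper_divisor_sum num > num then genLoopB fuel n (count+1) (num+1) (acc ++ [num])
      else genLoopB fuel n count (num+1) acc
    else acc

def gen_first_abundants_alt (n : Int) : List Int := genLoopB (6 * n.toNat + 12) n 0 1 []

-- ===== PRECONDITION & SPEC =====
def Spec_gen_first_abundants (n : Int) (out : List Int) : Prop := out = gen_first_abundants_alt n
instance (n : Int) (out : List Int) : Decidable (Spec_gen_first_abundants n out) := by unfold Spec_gen_first_abundants; infer_instance

-- ===== CLAIM (what is proved, stated in full; the proofs are below) =====
def Claim_equal_gen_first_abundants : Prop := ∀ (n : Int), Dom_gen_first_abundants n → Spec_gen_first_abundants n (gen_first_abundants n)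

-- ===== LEMMAS AND PROOFS =====

-- The accumulate-if fold of A's inner loop, as a sum.
theorem foldl_if_add {β : Type} (l : List β) (p : β → Prop) [DecidablePred p]
    (v : β → Int) (init : Int) :
    l.foldl (fun t x => if p x then t + v x else t) init
    = init + (l.map (fun x => if p x then v x else 0)).sum := by
  induction l generalizing init with
  | nil => simp
  | cons x xs ih =>
    simp only [List.foldl_cons, List.map_cons, List.sum_cons, ih]
    split_ifs <;> ring

-- A's divisor-sum fold, as a cast Nat sum over proper divisors 1 ≤ d < N.
theorem sumA_eq (N : Nat) :
    (PySem.List.pyRange 1 (N:Int) 1).foldl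
      (fun total d => if PySem.Int.mod (N:Int) d = 0 then total + d else total) 0
    = ((∑ d ∈ Finset.Ico 1 N, if d ∣ N then d else 0 : Nat) : Int) := by
  rw [foldl_if_add (PySem.List.pyRange 1 (N:Int) 1)
        (fun d => PySem.Int.mod (N:Int) d = 0) (fun d => d) 0, zero_add,
      PySem.List.pyRange_one, List.map_map]
  have hM : (((N:Int)) - 1).toNat = N - 1 := by omega
  rw [hM]
  have hlist : ∀ (g : Nat → Int) (M : Nat), ((List.range M).map g).sum = ∑ k ∈ Finset.range M, g k :=
    fun g M => rfl
  rw [hlist]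
  rw [show (∑ d ∈ Finset.Ico 1 N, if d ∣ N then d else 0)
        = ∑ k ∈ Finset.range (N-1), (if (1+k) ∣ N then 1+k else 0) from by
      rw [Finset.sum_Ico_eq_sum_range]]
  rw [Nat.cast_sum]
  refine Finset.sum_congr rfl ?_
  intro k _
  simp only [Function.comp]
  by_cases hd : (1+k) ∣ N
  · rw [if_pos, if_pos hd] <;> push_cast
    · ring
    · rw [PySem.Int.mod_eq_zero_iff_dvd]; exact_mod_cast hd
  · rw [if_neg, if_neg hd]
    · simp
    · rw [PySem.Int.mod_eq_zero_iff_dvd]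
      intro hc; exact hd (by exact_mod_cast hc)

-- B's sqrt loop, as a cast Nat sum over the small divisors k ≤ d ≤ sqrt N.
theorem sigmaLoop_eq (N : Nat) (_hN : 2 ≤ N) :
    ∀ (fuel k : Nat) (total : Int), 1 ≤ k → Nat.sqrt N < k + fuel →
    sigmaLoop fuel (N:Int) (k:Int) total
    = total + ((∑ d ∈ Finset.Ico k (Nat.sqrt N + 1),
        if d ∣ N then (d + if N / d ≠ d then N / d else 0) else 0 : Nat) : Int) := by
  intro fuel
  induction fuel with
  | zero =>
    intro k total hk hlt
    rw [Finset.Ico_eq_empty (by omega)]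
    simp [sigmaLoop]
  | succ f ih =>
    intro k total hk hlt
    simp only [sigmaLoop]
    by_cases hsq : k ≤ Nat.sqrt N
    · have hkk : ((k:Int)) * k ≤ (N:Int) := by exact_mod_cast Nat.le_sqrt.mp hsq
      rw [if_pos hkk]
      have hcast : ((k:Int)) + 1 = ((k+1 : Nat) : Int) := by push_cast; ring
      have hsum : (∑ d ∈ Finset.Ico k (Nat.sqrt N + 1),
            if d ∣ N then (d + if N / d ≠ d then N / d else 0) else 0)
          = (if k ∣ N then (k + if N / k ≠ k then N / k else 0) else 0)
            + ∑ d ∈ Finset.Ico (k+1) (Nat.sqrt N + 1),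
                if d ∣ N then (d + if N / d ≠ d then N / d else 0) else 0 :=
        Finset.sum_eq_sum_Ico_succ_bot (by omega) _
      by_cases hdvd : k ∣ N
      · have hmod : PySem.Int.mod (N:Int) (k:Int) = 0 :=
          (PySem.Int.mod_eq_zero_iff_dvd _ _).mpr (Int.natCast_dvd_natCast.mpr hdvd)
        rw [if_pos hmod, PySem.Int.floordiv_natCast, hcast,
            ih (k+1) _ (by omega) (by omega), hsum, if_pos hdvd]
        by_cases hne : N / k = k
        · rw [if_neg (by exact_mod_cast not_not_intro hne), if_neg (by omega)]
          push_cast [hne]; ring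
        · rw [if_pos (by exact_mod_cast hne), if_pos (by omega)]
          push_cast; ring
      · have hmod : ¬ PySem.Int.mod (N:Int) (k:Int) = 0 := by
          rw [PySem.Int.mod_eq_zero_iff_dvd]
          intro hc; exact hdvd (by exact_mod_cast hc)
        rw [if_neg hmod, hcast, ih (k+1) _ (by omega) (by omega), hsum, if_neg hdvd]
        push_cast; ring
    · have hkk : ¬ ((k:Int)) * k ≤ (N:Int) := by
        intro hc
        exact hsq (Nat.le_sqrt.mpr (by exact_mod_cast hc))
      rw [if_neg hkk, Finset.Ico_eq_empty (by omega)]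
      simp

-- The divisor-pairing identity: proper divisors of N, summed directly, equal
-- 1 plus the paired sums over divisors in [2, sqrt N].
theorem pairing (N : Nat) (hN : 2 ≤ N) :
    (∑ d ∈ Finset.Ico 1 N, if d ∣ N then d else 0)
    = 1 + ∑ d ∈ Finset.Ico 2 (Nat.sqrt N + 1),
        if d ∣ N then (d + if N / d ≠ d then N / d else 0) else 0 := by
  have hs1 : 1 ≤ Nat.sqrt N := Nat.le_sqrt.mpr (by omega)
  have hsN : Nat.sqrt N + 1 ≤ N := by
    have := Nat.sqrt_lt_self (show 1 < N by omega); omega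
  rw [← Finset.sum_Ico_consecutive _ (show 1 ≤ Nat.sqrt N + 1 by omega) hsN,
      Finset.sum_eq_sum_Ico_succ_bot (show 1 < Nat.sqrt N + 1 by omega),
      if_pos (one_dvd N)]
  have hsplit : (∑ d ∈ Finset.Ico 2 (Nat.sqrt N + 1),
        if d ∣ N then (d + if N / d ≠ d then N / d else 0) else 0)
      = (∑ d ∈ Finset.Ico 2 (Nat.sqrt N + 1), if d ∣ N then d else 0)
        + ∑ d ∈ Finset.Ico 2 (Nat.sqrt N + 1), if d ∣ N ∧ N / d ≠ d then N / d else 0 := by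
    rw [← Finset.sum_add_distrib]
    refine Finset.sum_congr rfl ?_
    intro d _
    by_cases h1 : d ∣ N <;> by_cases h2 : N / d ≠ d <;> simp [h1, h2]
  have hbij : (∑ d ∈ Finset.Ico (Nat.sqrt N + 1) N, if d ∣ N then d else 0)
      = ∑ d ∈ Finset.Ico 2 (Nat.sqrt N + 1), if d ∣ N ∧ N / d ≠ d then N / d else 0 := by
    rw [← Finset.sum_filter, ← Finset.sum_filter]
    refine (Finset.sum_nbij' (fun d => N / d) (fun e => N / e) ?_ ?_ ?_ ?_ ?_).symm
    · intro d hd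
      simp only [Finset.mem_filter, Finset.mem_Ico] at hd ⊢
      obtain ⟨⟨h2d, hds⟩, hdvd, hne⟩ := hd
      obtain ⟨e, rfl⟩ := hdvd
      have hd0 : 0 < d := by omega
      rw [Nat.mul_div_cancel_left e hd0] at hne ⊢
      have hdd : d * d ≤ d * e := Nat.le_sqrt.mp (by omega : d ≤ (d * e).sqrt)
      have hde : d < e := lt_of_le_of_ne (Nat.le_of_mul_le_mul_left hdd hd0) (Ne.symm hne)
      refine ⟨⟨?_, ?_⟩, dvd_mul_left e d⟩
      · have : d * e < e ^ 2 := by nlinarith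
        have := Nat.sqrt_lt'.mpr this
        omega
      · nlinarith
    · intro e he
      simp only [Finset.mem_filter, Finset.mem_Ico] at he ⊢
      obtain ⟨⟨hse, heN⟩, hdvd⟩ := he
      obtain ⟨d, rfl⟩ := hdvd
      have he0 : 0 < e := by omega
      rw [Nat.mul_div_cancel_left d he0]
      have hlt : e * d < e ^ 2 := by
        have := Nat.sqrt_lt'.mp (show Nat.sqrt (e*d) < e by omega)
        exact this
      have hde : d < e := by nlinarith
      have h2d : 2 ≤ d := by
        rcases d with _ | _ | d
        · omega
        · omega
        · omega
      have hd0 : 0 < d := by omega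
      refine ⟨⟨h2d, ?_⟩, Dvd.intro_left e rfl, ?_⟩
      · have : d * d ≤ e * d := by nlinarith
        have := Nat.le_sqrt.mpr this
        omega
      · rw [Nat.mul_comm, Nat.mul_div_cancel_left e hd0]
        omega
    · intro d hd
      simp only [Finset.mem_filter, Finset.mem_Ico] at hd
      obtain ⟨⟨h2d, hds⟩, hdvd, hne⟩ := hd
      obtain ⟨e, rfl⟩ := hdvd
      have hd0 : 0 < d := by omega
      have he0 : 0 < e := by
        rcases Nat.eq_zero_or_pos e with h | h
        · subst h; simp at hds ⊢; omega
        · exact h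
      show d * e / (d * e / d) = d
      rw [Nat.mul_div_cancel_left e hd0, Nat.mul_comm, Nat.mul_div_cancel_left d he0]
    · intro e he
      simp only [Finset.mem_filter, Finset.mem_Ico] at he
      obtain ⟨⟨hse, heN⟩, hdvd⟩ := he
      obtain ⟨d, rfl⟩ := hdvd
      have he0 : 0 < e := by omega
      have hd0 : 0 < d := by
        rcases Nat.eq_zero_or_pos d with h | h
        · subst h; simp at heN
        · exact h
      show e * d / (e * d / e) = e
      rw [Nat.mul_div_cancel_left d he0, Nat.mul_comm, Nat.mul_div_cancel_left e hd0]
    · intro d _; rfl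
  rw [hsplit, ← hbij]
  norm_num
  omega

theorem proper_eq (N : Nat) (hN : 2 ≤ N) :
    proper_divisor_sum (N:Int)
    = ((1 + ∑ d ∈ Finset.Ico 2 (Nat.sqrt N + 1),
        if d ∣ N then (d + if N / d ≠ d then N / d else 0) else 0 : Nat) : Int) := by
  unfold proper_divisor_sum
  rw [if_neg (by omega)]
  have ht : ((N:Int)).toNat = N := by omega
  rw [ht, show ((2:Int)) = ((2:Nat):Int) by norm_num,
      sigmaLoop_eq N hN (N+2) 2 1 (by omega)
        (by have := Nat.sqrt_le_self N; omega)]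
  omega


theorem key (num : Int) (h : 1 ≤ num) :
    is_abundant num = decide (proper_divisor_sum num > num) := by
  by_cases h1 : num = 1
  · subst h1; decide
  · have h2 : 2 ≤ num := by omega
    lift num to Nat using (by omega : (0:Int) ≤ num) with N
    have hN : 2 ≤ N := by exact_mod_cast h2
    unfold is_abundant
    rw [sumA_eq, proper_eq N hN, pairing N hN]

theorem loops_eq : ∀ (fuel : Nat) (n count num : Int) (acc : List Int), 1 ≤ num →
    genLoopA fuel n count num acc = genLoopB fuel n count num acc := by
  intro fuel
  induction fuel with
  | zero => intro n count num acc _; rfl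
  | succ f ih =>
    intro n count num acc h
    simp only [genLoopA, genLoopB, key num h, decide_eq_true_eq]
    split_ifs with h1 h2
    · exact ih n (count+1) (num+1) (acc ++ [num]) (by omega)
    · exact ih n count (num+1) acc (by omega)
    · rfl

-- ===== VERDICT (by name: the statement is the Claim_ definition above) =====
theorem gen_first_abundants_spec : Claim_equal_gen_first_abundants := by
  intro n _
  unfold Spec_gen_first_abundants gen_first_abundants gen_first_abundants_alt
  exact loops_eq _ n 0 1 [] (by norm_num)
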